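-- pv_equiv track=rewrite | github.com/mdk44/AdventOfCode2016 | Day 7/Day 7.py | check_aba
-- ===== SOURCE A (Python) =====
-- def check_aba(string):
--     aba = []
--     bab = []
--     for i in range(2, len(string)):
--         if string[i - 2] == string[i] and string[i - 2] != string[i - 1]:
--             new = string[i - 2] + string[i - 1] + string[i]
--             aba.append(new)
--             new2 = string[i - 1] + string[i] + string[i - 1]
--             bab.append(new2)
--     return aba, bab
-- ===== SOURCE B (Python) =====
-- def check_aba(string):
--     # Divide and conquer: windows of s = windows of s[:m+2] ++ windows of s[m:]
--     n = len(string)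
--     if n < 3:
--         return [], []
--     if n == 3:
--         a, b, c = string
--         if a == c and a != b:
--             return [a + b + c], [b + c + b]
--         return [], []
--     m = (n - 2) // 2
--     la, lb = check_aba(string[:m + 2])
--     ra, rb = check_aba(string[m:])
--     return la + ra, lb + rb
-- ===== Notes on version B (the rewrite author's own statement) =====
-- stated objective: alternative
-- what changed: Replaces A's single indexed left-to-right scan that appends to two lists by a divide-and-conquer recursion: the string is split at m=(n-2)//2 into two overlapping halves s[:m+2] and s[m:] whose window lists are computed recursively and concatenated, with direct base cases for n<=3.
import Mathlib
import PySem

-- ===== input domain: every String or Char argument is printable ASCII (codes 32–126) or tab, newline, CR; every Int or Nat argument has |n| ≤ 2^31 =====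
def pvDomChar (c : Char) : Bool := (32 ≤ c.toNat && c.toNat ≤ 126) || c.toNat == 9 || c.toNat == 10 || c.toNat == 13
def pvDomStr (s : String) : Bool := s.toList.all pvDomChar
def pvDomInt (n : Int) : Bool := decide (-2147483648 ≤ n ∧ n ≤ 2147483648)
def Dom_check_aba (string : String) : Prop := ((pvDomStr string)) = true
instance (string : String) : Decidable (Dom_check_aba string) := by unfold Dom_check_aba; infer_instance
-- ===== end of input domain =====

-- B computes the same pair of lists by divide and conquer (split into two overlapping
-- halves, recurse, concatenate) instead of A's single indexed appending loop
-- (same return value; objective: alternative algorithm, no speed claim).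

-- ===== PORT A =====
-- indexed loop 'for i in range(2, len(string))'; string[k] via pyGetD (indices are
-- always in range, so the default is never used)
def check_aba (string : String) : List String × List String :=
  let cs := string.toList
  let r :=
    (PySem.List.pyRange 2 cs.length 1).foldl
      (fun (acc : List String × List String) (i : Int) =>
        let a := PySem.List.pyGetD cs (i - 2) ' '
        let b := PySem.List.pyGetD cs (i - 1) ' '
        let c := PySem.List.pyGetD cs i ' '
        if a = c ∧ a ≠ b then
          (acc.1 ++ [String.ofList [a, b, c]], acc.2 ++ [String.ofList [b, c, b]])
        else acc)
      ([], [])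
  (r.1, r.2)

-- ===== PORT B =====
-- divide and conquer on the character list; string[:m+2] / string[m:] as take / drop;
-- the fuel argument (initially the length) is only a structural totality guard: both
-- recursive calls are on strictly shorter lists, so it is never exhausted
def check_aba_alt_go : Nat → List Char → List String × List String
  | 0, _ => ([], [])
  | fuel + 1, cs =>
    if cs.length < 3 then ([], [])
    else if cs.length = 3 then
      match cs with
      | a :: b :: c :: _ =>
          if a = c ∧ a ≠ b then
            ([String.ofList [a, b, c]], [String.ofList [b, c, b]])
          else ([], [])
      | _ => ([], [])
    else
      let m := (cs.length - 2) / 2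
      let l := check_aba_alt_go fuel (cs.take (m + 2))
      let r := check_aba_alt_go fuel (cs.drop m)
      (l.1 ++ r.1, l.2 ++ r.2)

def check_aba_alt (string : String) : List String × List String :=
  check_aba_alt_go string.toList.length string.toList

-- ===== PRECONDITION & SPEC =====
def Spec_check_aba (string : String) (out : List String × List String) : Prop := out = check_aba_alt string
instance (string : String) (out : List String × List String) : Decidable (Spec_check_aba string out) := by unfold Spec_check_aba; infer_instance

-- ===== CLAIM (what is proved, stated in full; the proofs are below) =====
def Claim_equal_check_aba : Prop := ∀ (string : String), Dom_check_aba string → Spec_check_aba string (check_aba string)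

-- ===== LEMMAS AND PROOFS =====

-- the ABA triples of a character list, by sliding-window recursion (reference spec)
def pvF : List Char → List String
  | a :: b :: c :: r =>
      if a = c ∧ a ≠ b then String.ofList [a, b, c] :: pvF (b :: c :: r)
      else pvF (b :: c :: r)
  | _ => []

-- the BAB triples, same windows
def pvG : List Char → List String
  | a :: b :: c :: r =>
      if a = c ∧ a ≠ b then String.ofList [b, c, b] :: pvG (b :: c :: r)
      else pvG (b :: c :: r)
  | _ => []

lemma pvF_short (cs : List Char) (h : cs.length ≤ 2) : pvF cs = [] := by
  match cs with
  | [] => rfl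
  | [_] => rfl
  | [_, _] => rfl
  | _ :: _ :: _ :: _ => simp at h

lemma pvG_short (cs : List Char) (h : cs.length ≤ 2) : pvG cs = [] := by
  match cs with
  | [] => rfl
  | [_] => rfl
  | [_, _] => rfl
  | _ :: _ :: _ :: _ => simp at h

-- windows split: windows of cs = windows of cs.take (m+2) ++ windows of cs.drop m
lemma pvF_split (m : Nat) (cs : List Char) (h : m + 2 ≤ cs.length) :
    pvF cs = pvF (cs.take (m + 2)) ++ pvF (cs.drop m) := by
  induction m generalizing cs with
  | zero =>
      rw [pvF_short (cs.take 2) (by simp), List.drop_zero, List.nil_append]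
  | succ m ih =>
      match cs with
      | a :: b :: c :: r =>
          have ht : m + 2 ≤ (b :: c :: r).length := by simp at h ⊢; omega
          have ih' := ih (b :: c :: r) ht
          have htake : (a :: b :: c :: r).take (m + 1 + 2) =
              a :: (b :: c :: r).take (m + 2) := by rfl
          have hdrop : (a :: b :: c :: r).drop (m + 1) = (b :: c :: r).drop m := by rfl
          rw [htake, hdrop]
          have htk : (b :: c :: r).take (m + 2) = b :: c :: List.take m r := rfl
          rw [htk]
          simp only [pvF]
          rw [← htk, ih']
          by_cases hc : a = c ∧ a ≠ b
          · rw [if_pos hc, if_pos hc, List.cons_append]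
          · rw [if_neg hc, if_neg hc]
      | [] => simp at h
      | [_] => simp at h
      | [_, _] => simp at h

lemma pvG_split (m : Nat) (cs : List Char) (h : m + 2 ≤ cs.length) :
    pvG cs = pvG (cs.take (m + 2)) ++ pvG (cs.drop m) := by
  induction m generalizing cs with
  | zero =>
      rw [pvG_short (cs.take 2) (by simp), List.drop_zero, List.nil_append]
  | succ m ih =>
      match cs with
      | a :: b :: c :: r =>
          have ht : m + 2 ≤ (b :: c :: r).length := by simp at h ⊢; omega
          have ih' := ih (b :: c :: r) ht
          have htake : (a :: b :: c :: r).take (m + 1 + 2) =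
              a :: (b :: c :: r).take (m + 2) := by rfl
          have hdrop : (a :: b :: c :: r).drop (m + 1) = (b :: c :: r).drop m := by rfl
          rw [htake, hdrop]
          have htk : (b :: c :: r).take (m + 2) = b :: c :: List.take m r := rfl
          rw [htk]
          simp only [pvG]
          rw [← htk, ih']
          by_cases hc : a = c ∧ a ≠ b
          · rw [if_pos hc, if_pos hc, List.cons_append]
          · rw [if_neg hc, if_neg hc]
      | [] => simp at h
      | [_] => simp at h
      | [_, _] => simp at h

-- B's recursion computes exactly (pvF, pvG) whenever the fuel suffices
lemma pvGo_eq (fuel : Nat) (cs : List Char) (h : cs.length ≤ fuel) :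
    check_aba_alt_go fuel cs = (pvF cs, pvG cs) := by
  induction fuel generalizing cs with
  | zero =>
      have hnil : cs = [] := List.eq_nil_of_length_eq_zero (by omega)
      subst hnil; rfl
  | succ n ih =>
      by_cases h3 : cs.length < 3
      · simp only [check_aba_alt_go, if_pos h3]
        rw [pvF_short cs (by omega), pvG_short cs (by omega)]
      · by_cases he : cs.length = 3
        · match cs with
          | a :: b :: c :: t =>
              have ht : t = [] := by simpa using he
              subst ht
              simp only [check_aba_alt_go, if_neg h3, if_pos he]
              by_cases hc : a = c ∧ a ≠ b
              · rw [if_pos hc]; simp only [pvF, pvG]; rw [if_pos hc, if_pos hc]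
              · rw [if_neg hc]; simp only [pvF, pvG]; rw [if_neg hc, if_neg hc]
          | [] => simp at he
          | [_] => simp at he
          | [_, _] => simp at he
        · simp only [check_aba_alt_go, if_neg h3, if_neg he]
          have hm : (cs.length - 2) / 2 + 2 ≤ cs.length := by omega
          rw [ih (cs.take ((cs.length - 2) / 2 + 2)) (by simp only [List.length_take]; omega),
              ih (cs.drop ((cs.length - 2) / 2)) (by simp only [List.length_drop]; omega)]
          rw [← pvF_split _ cs hm, ← pvG_split _ cs hm]

lemma pv_getD_of_drop (full : List Char) (j : Nat) (x : Char) (s : List Char)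
    (h : full.drop j = x :: s) : full.getD j ' ' = x := by
  have h0 := List.getElem?_drop (xs := full) (i := j) (j := 0)
  rw [h] at h0
  have : full[j]? = some x := by simpa using h0.symm
  simp [List.getD, this]

lemma pvA_loop (full : List Char) (t : List Char) (j : Nat)
    (hj : j ≤ full.length) (h : full.drop j = t) (acc : List String × List String) :
    (PySem.List.pyRange ((j : Int) + 2) full.length 1).foldl
      (fun (acc : List String × List String) (i : Int) =>
        let a := PySem.List.pyGetD full (i - 2) ' '
        let b := PySem.List.pyGetD full (i - 1) ' '
        let c := PySem.List.pyGetD full i ' '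
        if a = c ∧ a ≠ b then
          (acc.1 ++ [String.ofList [a, b, c]], acc.2 ++ [String.ofList [b, c, b]])
        else acc)
      acc = (acc.1 ++ pvF t, acc.2 ++ pvG t) := by
  have hlen : full.length = j + t.length := by
    have := List.length_drop (l := full) (i := j)
    rw [h] at this; omega
  match t with
  | [] =>
      rw [PySem.List.pyRange_one_eq_nil (by simp [hlen])]
      simp [pvF, pvG]
  | [_] =>
      rw [PySem.List.pyRange_one_eq_nil (by simp [hlen])]
      simp [pvF, pvG]
  | [_, _] =>
      rw [PySem.List.pyRange_one_eq_nil (by simp [hlen])]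
      simp [pvF, pvG]
  | a :: b :: c :: r =>
      have hd1 : full.drop (j + 1) = b :: c :: r := by
        rw [← List.tail_drop, h]; rfl
      have hd2 : full.drop (j + 2) = c :: r := by
        rw [← List.tail_drop, hd1]; rfl
      have ha : full.getD j ' ' = a := pv_getD_of_drop full j a _ h
      have hb : full.getD (j + 1) ' ' = b := pv_getD_of_drop full (j + 1) b _ hd1
      have hc : full.getD (j + 2) ' ' = c := pv_getD_of_drop full (j + 2) c _ hd2
      have hlt : ((j : Int) + 2) < (full.length : Int) := by
        simp [hlen]; omega
      rw [PySem.List.pyRange_one_cons hlt, List.foldl_cons]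
      have e2 : ((j : Int) + 2) = (((j + 2 : Nat)) : Int) := by push_cast; ring
      have e0 : (((j + 2 : Nat)) : Int) - 2 = ((j : Nat) : Int) := by push_cast; ring
      have e1 : (((j + 2 : Nat)) : Int) - 1 = (((j + 1 : Nat)) : Int) := by push_cast; ring
      have ecast : (((j + 2 : Nat)) : Int) + 1 = (((j + 1 : Nat)) : Int) + 2 := by
        push_cast; ring
      have ih := pvA_loop full (b :: c :: r) (j + 1) (by omega) hd1
      simp only [e2, e0, e1, PySem.List.pyGetD_natCast, ha, hb, hc, ecast]
      by_cases hcond : a = c ∧ a ≠ b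
      · rw [if_pos hcond, ih]
        simp only [pvF, pvG]
        rw [if_pos hcond, if_pos hcond]
        simp
      · rw [if_neg hcond, ih]
        simp only [pvF, pvG]
        rw [if_neg hcond, if_neg hcond]

-- ===== VERDICT (by name: the statement is the Claim_ definition above) =====
theorem check_aba_spec : Claim_equal_check_aba := by
  intro s _
  show check_aba s = check_aba_alt s
  unfold check_aba check_aba_alt
  have hA := pvA_loop s.toList s.toList 0 (by omega) (by simp) ([], [])
  simp only [Nat.cast_zero, zero_add] at hA
  simp only [hA, List.nil_append]
  rw [pvGo_eq s.toList.length s.toList le_rfl]
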